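-- pv_equiv track=rewrite | github.com/red-lexinus/steganography_progect | steganography_in_text/functions.py | decrypt_first
-- ===== SOURCE A (Python) =====
-- def decrypt_first(word):
--     # перетасовка текста обратно
--     txt = ''
--     if len(word) % 2 == 0:
--         for i in range(len(word) // 2):
--             txt += word[i]
--             txt += word[len(word) // 2 + i]
--     else:
--         for i in range(len(word) // 2):
--             txt += word[i]
--             txt += word[len(word) // 2 + i + 1]
--         txt += word[len(word) // 2]
--     return txt
-- ===== SOURCE B (Python) =====
-- def decrypt_first(word):
--     # reconstruct by slice assignment: first ceil(n/2) chars go to even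
--     # positions, the rest to odd positions
--     m = (len(word) + 1) // 2
--     res = [None] * len(word)
--     res[0::2] = word[:m]
--     res[1::2] = word[m:]
--     return ''.join(res)
-- ===== Notes on version B (the rewrite author's own statement) =====
-- stated objective: faster
-- what changed: Replaces the parity-branched index loop that grows the result by repeated string concatenation with a slice-assignment reconstruction: the first ceil(n/2) characters fill the even positions, the rest the odd positions, and one join builds the string.
import Mathlib
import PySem

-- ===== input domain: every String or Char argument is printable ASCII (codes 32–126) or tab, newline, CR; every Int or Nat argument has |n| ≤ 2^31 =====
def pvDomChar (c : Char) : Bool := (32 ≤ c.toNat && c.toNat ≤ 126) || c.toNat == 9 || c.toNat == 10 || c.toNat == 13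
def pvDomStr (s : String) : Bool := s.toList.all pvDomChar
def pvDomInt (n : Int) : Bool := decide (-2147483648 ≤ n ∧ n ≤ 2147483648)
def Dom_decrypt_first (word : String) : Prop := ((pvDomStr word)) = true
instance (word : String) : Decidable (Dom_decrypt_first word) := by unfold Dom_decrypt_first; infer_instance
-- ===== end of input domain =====

-- B un-interleaves by placing the first ceil(n/2) chars at even positions and the rest at odd
-- positions (slice assignment) instead of A's parity-branched index loop; return values proved equal.

-- ===== PORT A =====
-- literal transliteration of A's parity-branched loop; word[i] is PySem.List.pyGet?
-- (Option.toList: always `some` here since every index is in range, so exact)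
def decrypt_first (word : String) : String :=
  let cs := word.toList
  let n : Int := (cs.length : Int)
  let txt : List Char :=
    if PySem.Int.mod n 2 = 0 then
      (PySem.List.pyRange 0 (PySem.Int.floordiv n 2) 1).foldl (fun txt i =>
        txt ++ (PySem.List.pyGet? cs i).toList
            ++ (PySem.List.pyGet? cs (PySem.Int.floordiv n 2 + i)).toList) []
    else
      ((PySem.List.pyRange 0 (PySem.Int.floordiv n 2) 1).foldl (fun txt i =>
        txt ++ (PySem.List.pyGet? cs i).toList
            ++ (PySem.List.pyGet? cs (PySem.Int.floordiv n 2 + i + 1)).toList) [])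
      ++ (PySem.List.pyGet? cs (PySem.Int.floordiv n 2)).toList
  String.ofList txt

-- ===== PORT B =====
-- res[0::2] = xs; res[1::2] = ys  (|xs| = |ys| or |xs| = |ys|+1): alternating merge
def pvAltMerge : List Char → List Char → List Char
  | [], ys => ys
  | x :: xs, ys => x :: pvAltMerge ys xs
termination_by xs ys => xs.length + ys.length
decreasing_by simp; omega

def decrypt_first_alt (word : String) : String :=
  let cs := word.toList
  let m := (cs.length + 1) / 2
  String.ofList (pvAltMerge (cs.take m) (cs.drop m))

-- ===== PRECONDITION & SPEC =====
def Spec_decrypt_first (word : String) (out : String) : Prop := out = decrypt_first_alt word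
instance (word : String) (out : String) : Decidable (Spec_decrypt_first word out) := by unfold Spec_decrypt_first; infer_instance

-- ===== CLAIM (what is proved, stated in full; the proofs are below) =====
def Claim_equal_decrypt_first : Prop := ∀ (word : String), Dom_decrypt_first word → Spec_decrypt_first word (decrypt_first word)

-- ===== LEMMAS AND PROOFS =====

theorem merge_even (xs ys : List Char) (h : xs.length = ys.length) :
    (List.range xs.length).flatMap (fun j => xs[j]?.toList ++ ys[j]?.toList) = pvAltMerge xs ys := by
  induction xs generalizing ys with
  | nil => cases ys with
    | nil => simp [pvAltMerge]
    | cons y ys => simp at h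
  | cons x xs ih => cases ys with
    | nil => simp at h
    | cons y ys =>
      simp only [List.length_cons, List.range_succ_eq_map, List.flatMap_cons, List.flatMap_map]
      simp only [List.getElem?_cons_succ]
      rw [pvAltMerge, pvAltMerge]
      simp [ih ys (by simpa using h)]

theorem merge_odd (xs ys : List Char) (h : xs.length = ys.length + 1) :
    (List.range ys.length).flatMap (fun j => xs[j]?.toList ++ ys[j]?.toList) ++ xs[ys.length]?.toList
      = pvAltMerge xs ys := by
  induction ys generalizing xs with
  | nil =>
    cases xs with
    | nil => simp at h
    | cons x xs =>
      have : xs = [] := by simpa using h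
      subst this; simp [pvAltMerge]
  | cons y ys ih =>
    cases xs with
    | nil => simp at h
    | cons x xs =>
      simp only [List.length_cons, List.range_succ_eq_map, List.flatMap_cons, List.flatMap_map]
      simp only [List.getElem?_cons_succ]
      rw [pvAltMerge, pvAltMerge]
      simp [ih xs (by simpa using h)]

-- ===== VERDICT (by name: the statement is the Claim_ definition above) =====
theorem decrypt_first_spec : Claim_equal_decrypt_first := by
  intro word _
  show decrypt_first word = decrypt_first_alt word
  simp only [decrypt_first, decrypt_first_alt]
  set cs := word.toList with hcs
  rcases Nat.even_or_odd cs.length with ⟨k, hk⟩ | ⟨k, hk⟩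
  · -- even, length = 2k
    have hmod : PySem.Int.mod (cs.length : Int) 2 = 0 := by
      rw [show ((2:Int)) = ((2:Nat):Int) by norm_num, PySem.Int.mod_natCast]
      omega
    have hdiv : PySem.Int.floordiv (cs.length : Int) 2 = (k : Int) := by
      rw [show ((2:Int)) = ((2:Nat):Int) by norm_num, PySem.Int.floordiv_natCast]
      norm_cast; omega
    rw [if_pos hmod, hdiv]
    have hm : (cs.length + 1) / 2 = k := by omega
    rw [hm]
    simp only [List.append_assoc]
    rw [PySem.List.foldl_append_eq_flatMap, PySem.List.pyRange_one, List.flatMap_map]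
    simp only [zero_add, Int.sub_zero, Int.toNat_natCast, PySem.List.pyGet?_natCast, List.nil_append]
    rw [← merge_even (cs.take k) (cs.drop k) (by simp; omega),
        show (cs.take k).length = k by simp; omega]
    congr 1
    apply List.flatMap_congr
    intro j hj
    rw [List.mem_range] at hj
    rw [List.getElem?_take_of_lt (by omega), List.getElem?_drop]
    congr 2
    rw [show ((k:Int) + (j:Int)) = ((k+j : Nat) : Int) by push_cast; ring, PySem.List.pyGet?_natCast]
  · -- odd, length = 2k+1
    have hmod : ¬ PySem.Int.mod (cs.length : Int) 2 = 0 := by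
      rw [show ((2:Int)) = ((2:Nat):Int) by norm_num, PySem.Int.mod_natCast]
      omega
    have hdiv : PySem.Int.floordiv (cs.length : Int) 2 = (k : Int) := by
      rw [show ((2:Int)) = ((2:Nat):Int) by norm_num, PySem.Int.floordiv_natCast]
      norm_cast; omega
    rw [if_neg hmod, hdiv]
    have hm : (cs.length + 1) / 2 = k + 1 := by omega
    rw [hm]
    simp only [List.append_assoc]
    rw [PySem.List.foldl_append_eq_flatMap, PySem.List.pyRange_one, List.flatMap_map]
    simp only [zero_add, Int.sub_zero, Int.toNat_natCast, PySem.List.pyGet?_natCast, List.nil_append]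
    have hlen : (cs.drop (k+1)).length = k := by simp; omega
    rw [← merge_odd (cs.take (k+1)) (cs.drop (k+1)) (by simp; omega), hlen]
    congr 1
    congr 1
    · apply List.flatMap_congr
      intro j hj
      rw [List.mem_range] at hj
      rw [List.getElem?_take_of_lt (by omega), List.getElem?_drop]
      congr 2
      rw [show ((k:Int) + (j:Int) + 1) = (((k+1)+j : Nat) : Int) by push_cast; ring, PySem.List.pyGet?_natCast]
    · rw [List.getElem?_take_of_lt (by omega)]
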